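-- pv_equiv track=rewrite | github.com/glibesyck/URest | urest/interaction_data.py | counting_user_words
-- ===== SOURCE A (Python) =====
-- def counting_user_words (poems : list, keywords : list) -> dict :
--     '''
--     Return the dictionary where keys are the names of poems and values are numbers
--     how many times keywords appeared in the poems.
--     >>> counting_user_words(reading_file('POEMS.txt'), ['rainbow'])
--     {'"FIDELITY"': 2, '"My heart leaps up..."': 2, '"ODE"': 2}
--     '''
--     poem_dict = {}
--     for keyword in keywords :
--         for poem in poems :
--             for string_of_poem in poem[1] :
--                 if keyword in string_of_poem or keyword.capitalize() in string_of_poem :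
--                     poem_dict[poem[0]] = poem_dict.get(poem[0], 1) + 1
--     return poem_dict
-- ===== SOURCE B (Python) =====
-- def counting_user_words(poems, keywords):
--     # Pre-count, in one poem-major pass over the text, how many lines of each
--     # poem contain each keyword (or its capitalized form); then replay the
--     # per-(keyword, poem) totals keyword-major as single batched dict updates,
--     # which reproduces the dict's key order and values without per-line updates.
--     caps = [kw.capitalize() for kw in keywords]
--     counts = [[sum(1 for line in lines if kw in line or cap in line)
--                for kw, cap in zip(keywords, caps)]
--               for _, lines in poems]
--     result = {}
--     for ki in range(len(keywords)):
--         for (name, _), row in zip(poems, counts):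
--             if row[ki]:
--                 result[name] = result.get(name, 1) + row[ki]
--     return result
-- ===== Notes on version B (the rewrite author's own statement) =====
-- stated objective: alternative
-- what changed: A updates the dict once per matching (keyword, poem, line) triple inside a keyword-major triple loop; B first builds a per-poem/per-keyword count table in one poem-major pass over the text, then replays the table keyword-major with a single batched dict update per (keyword, poem) cell.
import Mathlib
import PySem

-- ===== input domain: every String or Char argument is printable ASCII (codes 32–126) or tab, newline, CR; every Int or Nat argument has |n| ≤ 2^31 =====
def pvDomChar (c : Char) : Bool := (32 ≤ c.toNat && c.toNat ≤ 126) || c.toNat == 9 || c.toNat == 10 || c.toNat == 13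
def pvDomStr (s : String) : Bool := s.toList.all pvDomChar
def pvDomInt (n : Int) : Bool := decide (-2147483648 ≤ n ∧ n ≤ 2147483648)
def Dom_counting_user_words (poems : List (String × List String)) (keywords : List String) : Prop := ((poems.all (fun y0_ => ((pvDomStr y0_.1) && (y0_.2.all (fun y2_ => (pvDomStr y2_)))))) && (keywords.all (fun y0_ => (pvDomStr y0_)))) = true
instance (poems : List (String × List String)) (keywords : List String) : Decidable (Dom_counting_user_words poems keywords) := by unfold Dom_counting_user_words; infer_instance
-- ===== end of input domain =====

-- B replaces A's per-line dict updates by a poem-major counting pass over the text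
-- followed by a keyword-major replay of batched per-poem totals ('alternative',
-- same asymptotic cost, fewer dict operations).

-- shared hand-port of str.capitalize(): upper-case the first character, lower-case
-- the rest (exact on the ASCII domain, via PySem.Chars.upperChar / Chars.lower)
def pyCapitalize (s : String) : String :=
  match s.toList with
  | [] => ""
  | c :: rest => String.ofList (PySem.Chars.upperChar c :: PySem.Chars.lower rest)

-- ===== PORT A =====
def counting_user_words (poems : List (String × List String)) (keywords : List String) : List (String × Int) :=
  (keywords.foldl (fun d keyword =>
    poems.foldl (fun d poem =>
      poem.2.foldl (fun d string_of_poem =>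
        if PySem.Str.isIn keyword string_of_poem || PySem.Str.isIn (pyCapitalize keyword) string_of_poem then
          PySem.Dict.insert d poem.1 (PySem.Dict.getD d poem.1 1 + 1)
        else d) d) d) PySem.Dict.empty).items

-- ===== PORT B =====
def counting_user_words_alt (poems : List (String × List String)) (keywords : List String) : List (String × Int) :=
  let caps := keywords.map pyCapitalize
  -- counts[pi][ki] = number of lines of poem pi containing keywords[ki] or caps[ki]
  let counts := poems.map (fun p =>
    (keywords.zip caps).map (fun q =>
      ((p.2.countP (fun line => PySem.Str.isIn q.1 line || PySem.Str.isIn q.2 line) : Nat) : Int)))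
  ((PySem.List.pyRange 0 (keywords.length : Int) 1).foldl (fun d ki =>
    (poems.zip counts).foldl (fun d pr =>
      let c := PySem.List.pyGetD pr.2 ki 0   -- row[ki]; always in range, so the default is never used
      if c ≠ 0 then PySem.Dict.insert d pr.1.1 (PySem.Dict.getD d pr.1.1 1 + c) else d) d)
    PySem.Dict.empty).items

-- ===== PRECONDITION & SPEC =====
def Spec_counting_user_words (poems : List (String × List String)) (keywords : List String) (out : List (String × Int)) : Prop := out = counting_user_words_alt poems keywords
instance (poems : List (String × List String)) (keywords : List String) (out : List (String × Int)) : Decidable (Spec_counting_user_words poems keywords out) := by unfold Spec_counting_user_words; infer_instance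

-- ===== CLAIM (what is proved, stated in full; the proofs are below) =====
def Claim_equal_counting_user_words : Prop := ∀ (poems : List (String × List String)) (keywords : List String), Dom_counting_user_words poems keywords → Spec_counting_user_words poems keywords (counting_user_words poems keywords)

-- ===== LEMMAS AND PROOFS =====

-- the line predicate both programs test
def pvHit (kw line : String) : Bool :=
  PySem.Str.isIn kw line || PySem.Str.isIn (pyCapitalize kw) line

-- matching-line count of one poem for one keyword
def pvCnt (kw : String) (lines : List String) : Int :=
  ((lines.countP (pvHit kw) : Nat) : Int)

-- one batched dict update (B's replay step)
def pvStep (d : PySem.Dict String Int) (name : String) (c : Int) : PySem.Dict String Int :=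
  if c ≠ 0 then PySem.Dict.insert d name (PySem.Dict.getD d name 1 + c) else d

-- the common canonical form both ports are reduced to
def pvCanon (poems : List (String × List String)) (keywords : List String) : PySem.Dict String Int :=
  keywords.foldl (fun d kw =>
    poems.foldl (fun d p => pvStep d p.1 (pvCnt kw p.2)) d) PySem.Dict.empty

-- a run of per-line (+1)-updates equals one batched update by the match count
lemma pv_batch (kw name : String) (lines : List String) (d : PySem.Dict String Int) :
    lines.foldl (fun d line =>
      if pvHit kw line then PySem.Dict.insert d name (PySem.Dict.getD d name 1 + 1) else d) d
    = pvStep d name (pvCnt kw lines) := by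
  induction lines generalizing d with
  | nil => simp [pvCnt, pvStep]
  | cons line rest ih =>
    by_cases h : pvHit kw line = true
    · simp only [List.foldl_cons, h, if_pos]
      rw [ih]
      have hc : pvCnt kw (line :: rest) = pvCnt kw rest + 1 := by
        simp [pvCnt, h]
      have hnn : (0 : Int) ≤ pvCnt kw rest := by simp [pvCnt]
      rw [hc]
      by_cases h0 : pvCnt kw rest = 0
      · simp [pvStep, h0]
      · have h1 : pvCnt kw rest + 1 ≠ 0 := by omega
        simp only [pvStep, h0, h1, if_pos, ne_eq, not_false_iff,
          PySem.Dict.getD_insert_self, PySem.Dict.insert_insert_self]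
        ring_nf
    · simp only [List.foldl_cons, h, if_neg, Bool.false_eq_true, not_false_iff]
      rw [ih]
      have hc : pvCnt kw (line :: rest) = pvCnt kw rest := by
        simp [pvCnt, h]
      rw [hc]

-- A's dict equals the canonical form
lemma pv_A_eq_canon (poems : List (String × List String)) (keywords : List String) :
    keywords.foldl (fun d keyword =>
      poems.foldl (fun d poem =>
        poem.2.foldl (fun d string_of_poem =>
          if PySem.Str.isIn keyword string_of_poem || PySem.Str.isIn (pyCapitalize keyword) string_of_poem then
            PySem.Dict.insert d poem.1 (PySem.Dict.getD d poem.1 1 + 1)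
          else d) d) d) PySem.Dict.empty
    = pvCanon poems keywords := by
  unfold pvCanon
  congr 1
  funext d kw
  congr 1
  funext d p
  exact pv_batch kw p.1 p.2 d

-- a fold over range(len(l)) whose body reads l[i] is a fold over l
lemma pv_foldl_pyRange_len {α β : Type} (l : List α) (G : β → Int → β) (F : β → α → β)
    (h : ∀ (i : Nat) (hi : i < l.length) (b : β), G b (i : Int) = F b l[i]) (b : β) :
    (PySem.List.pyRange 0 (l.length : Int) 1).foldl G b = l.foldl F b := by
  induction l using List.reverseRecOn generalizing b with
  | nil => simp [PySem.List.pyRange_one_eq_nil]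
  | append_singleton l a ih =>
    have hlen : ((l ++ [a]).length : Int) = (l.length : Int) + 1 := by
      simp
    rw [hlen, PySem.List.pyRange_one_succ_right (by positivity),
      List.foldl_append, List.foldl_append]
    have hl : (PySem.List.pyRange 0 (l.length : Int) 1).foldl G b = l.foldl F b := by
      apply ih
      intro i hi b'
      rw [h i (by simp; omega) b']
      congr 1
      exact List.getElem_append_left hi
    rw [hl]
    simp only [List.foldl_cons, List.foldl_nil]
    rw [h l.length (by simp) (l.foldl F b)]
    congr 1
    simp
  
-- B's dict equals the canonical form
lemma pv_B_eq_canon (poems : List (String × List String)) (keywords : List String) :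
    (PySem.List.pyRange 0 (keywords.length : Int) 1).foldl (fun d ki =>
      (poems.zip (poems.map (fun p =>
        (keywords.zip (keywords.map pyCapitalize)).map (fun q =>
          ((p.2.countP (fun line => PySem.Str.isIn q.1 line || PySem.Str.isIn q.2 line) : Nat) : Int))))).foldl
        (fun d pr =>
          let c := PySem.List.pyGetD pr.2 ki 0
          if c ≠ 0 then PySem.Dict.insert d pr.1.1 (PySem.Dict.getD d pr.1.1 1 + c) else d) d)
      PySem.Dict.empty
    = pvCanon poems keywords := by
  -- rows are maps over keywords
  have hzipkw : keywords.zip (keywords.map pyCapitalize)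
      = keywords.map (fun kw => (kw, pyCapitalize kw)) := by
    have := @List.zip_map' String String String id pyCapitalize keywords
    simpa using this
  unfold pvCanon
  apply pv_foldl_pyRange_len
  intro i hi d
  -- turn the zip-with-its-map fold into a fold over poems
  have hzip : poems.zip (poems.map (fun p =>
      (keywords.zip (keywords.map pyCapitalize)).map (fun q =>
        ((p.2.countP (fun line => PySem.Str.isIn q.1 line || PySem.Str.isIn q.2 line) : Nat) : Int))))
      = poems.map (fun p => (p, keywords.map (fun kw => pvCnt kw p.2))) := by
    have := @List.zip_map' (String × List String) (String × List String) (List Int) id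
      (fun p => (keywords.zip (keywords.map pyCapitalize)).map (fun q =>
        ((p.2.countP (fun line => PySem.Str.isIn q.1 line || PySem.Str.isIn q.2 line) : Nat) : Int)))
      poems
    simp only [List.map_id] at this
    rw [this]
    apply List.map_congr_left
    intro p _
    rw [hzipkw, List.map_map]
    rfl
  rw [hzip, List.foldl_map]
  apply PySem.List.foldl_congr_mem
  intro d' p _
  have hget : PySem.List.pyGetD (keywords.map (fun kw => pvCnt kw p.2)) (i : Int) 0
      = pvCnt keywords[i] p.2 := by
    rw [PySem.List.pyGetD_natCast]
    rw [List.getD_eq_getElem?_getD]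
    simp [hi]
  simp only [hget, pvStep]

-- ===== VERDICT (by name: the statement is the Claim_ definition above) =====
theorem counting_user_words_spec : Claim_equal_counting_user_words := by
  intro poems keywords _
  show counting_user_words poems keywords = counting_user_words_alt poems keywords
  simp only [counting_user_words, counting_user_words_alt]
  rw [pv_A_eq_canon, pv_B_eq_canon]
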